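-- pv_equiv track=rewrite | github.com/hhat-lang/hhat_lang | hhat_lang/new_metaparser.py | meta_prod
-- ===== SOURCE A (Python) =====
-- def meta_prod(values):
--     val_list = values.split(" ")
--     head = val_list[:2]
--     val_len = len(val_list[2:])
--     prod_vals = []
--     for x0, x in enumerate(val_list[2:]):
--         if x != '|':
--             head.append(x)
--         else:
--             prod_vals.append('@pg.production(\"' + ' '.join(head) + '\")')
--             head = val_list[:2]
--         if x0 == val_len - 1:
--             prod_vals.append('@pg.production(\"' + ' '.join(head) + '\")')
--     return '\n'.join(prod_vals)
-- ===== SOURCE B (Python) =====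
-- def _groups(rest):
--     # partition rest at '|' tokens, by structural recursion; always nonempty
--     if not rest:
--         return [[]]
--     gs = _groups(rest[1:])
--     if rest[0] == '|':
--         return [[]] + gs
--     return [[rest[0]] + gs[0]] + gs[1:]
--
--
-- def meta_prod(values):
--     toks = values.split(" ")
--     prefix, rest = toks[:2], toks[2:]
--     if not rest:
--         return ""
--     return "\n".join('@pg.production("' + " ".join(prefix + g) + '")'
--                      for g in _groups(rest))
-- ===== Notes on version B (the rewrite author's own statement) =====
-- stated objective: simpler
-- what changed: B works in two phases: recursively partition the tail tokens into groups at each separator token, then map each group to its production string and join, replacing A's single enumerate loop with a reset buffer and a last-index special case.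
import Mathlib
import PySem

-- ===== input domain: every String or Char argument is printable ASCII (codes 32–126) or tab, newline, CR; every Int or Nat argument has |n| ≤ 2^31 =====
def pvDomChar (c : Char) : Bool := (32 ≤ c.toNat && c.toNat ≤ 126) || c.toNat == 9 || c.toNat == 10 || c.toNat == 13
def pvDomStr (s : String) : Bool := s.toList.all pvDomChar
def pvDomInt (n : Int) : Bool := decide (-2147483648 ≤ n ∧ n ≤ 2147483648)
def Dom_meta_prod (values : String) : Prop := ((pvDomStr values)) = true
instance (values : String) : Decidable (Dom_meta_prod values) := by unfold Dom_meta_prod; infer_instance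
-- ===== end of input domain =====

-- B replaces A's enumerate loop (reset buffer + last-index special case) by a recursive
-- partition of the tail tokens into '|'-separated groups followed by a map-and-join (simpler).

-- ===== PORT A =====
def meta_prod (values : String) : String :=
  let val_list := (PySem.Str.split? values " ").getD []
  let head0 := PySem.List.slice val_list none (some 2)
  let rest := PySem.List.slice val_list (some 2) none
  let val_len : Int := rest.length
  let st := (PySem.List.enumerate rest 0).foldl
    (fun (st : List String × List String) (p : Int × String) =>
      let (head, prod_vals) := st
      let (x0, x) := p
      let st1 :=
        if x ≠ "|" then (head ++ [x], prod_vals)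
        else (head0, prod_vals ++ ["@pg.production(\"" ++ PySem.Str.join " " head ++ "\")"])
      if x0 = val_len - 1 then
        (st1.1, st1.2 ++ ["@pg.production(\"" ++ PySem.Str.join " " st1.1 ++ "\")"])
      else st1)
    (head0, ([] : List String))
  PySem.Str.join "\n" st.2

-- ===== PORT B =====
-- partition at '|' tokens, structural recursion; result always nonempty
def pvGroups : List String → List (List String)
  | [] => [[]]
  | t :: ts =>
    let gs := pvGroups ts
    if t = "|" then [] :: gs
    else (t :: gs.headI) :: gs.tail

def meta_prod_alt (values : String) : String :=
  let toks := (PySem.Str.split? values " ").getD []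
  let pre := toks.take 2
  let rest := toks.drop 2
  if rest.isEmpty then ""
  else
    PySem.Str.join "\n"
      ((pvGroups rest).map
        (fun g => "@pg.production(\"" ++ PySem.Str.join " " (pre ++ g) ++ "\")"))

-- ===== PRECONDITION & SPEC =====
def Spec_meta_prod (values : String) (out : String) : Prop := out = meta_prod_alt values
instance (values : String) (out : String) : Decidable (Spec_meta_prod values out) := by unfold Spec_meta_prod; infer_instance

-- ===== CLAIM (what is proved, stated in full; the proofs are below) =====
def Claim_equal_meta_prod : Prop := ∀ (values : String), Dom_meta_prod values → Spec_meta_prod values (meta_prod values)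

-- ===== LEMMAS AND PROOFS =====

-- abbreviation for the production string built from a token list
def pvP (h : List String) : String := "@pg.production(\"" ++ PySem.Str.join " " h ++ "\")"

theorem pvGroups_ne_nil (l : List String) : pvGroups l ≠ [] := by
  cases l with
  | nil => simp [pvGroups]
  | cons t ts => simp only [pvGroups]; split <;> simp

theorem pvGroups_bar (l : List String) : pvGroups ("|" :: l) = [] :: pvGroups l := by
  simp [pvGroups]

theorem pvGroups_cons (x : String) (l : List String) (hx : ¬ x = "|") :
    pvGroups (x :: l) = (x :: (pvGroups l).headI) :: (pvGroups l).tail := by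
  simp [pvGroups, hx]

-- the generalized loop invariant for A's fold
theorem pvLoop (pre : List String) (n : Int) :
    ∀ (l : List String) (i : Int) (head pv : List String),
      l ≠ [] → i + l.length = n →
      ((PySem.List.enumerate l i).foldl
        (fun (st : List String × List String) (p : Int × String) =>
          let (h, pvs) := st
          let (x0, x) := p
          let st1 :=
            if x ≠ "|" then (h ++ [x], pvs)
            else (pre, pvs ++ [pvP h])
          if x0 = n - 1 then (st1.1, st1.2 ++ [pvP st1.1]) else st1)
        (head, pv)).2
      = pv ++ [pvP (head ++ (pvGroups l).headI)]
          ++ ((pvGroups l).tail).map (fun g => pvP (pre ++ g)) := by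
  intro l
  induction l with
  | nil => intro i head pv hne _; exact absurd rfl hne
  | cons x ts ih =>
    intro i head pv _ hlen
    rw [PySem.List.enumerate_cons, List.foldl_cons]
    cases ts with
    | nil =>
      -- last element: index i = n - 1
      have hi : i = n - 1 := by simp at hlen; omega
      by_cases hx : x = "|"
      · subst hx
        simp [PySem.List.enumerate, hi, pvGroups, pvP]
      · simp [PySem.List.enumerate, hi, hx, pvGroups, pvP]
    | cons y ys =>
      have hi : ¬ (i = n - 1) := by simp at hlen; omega
      by_cases hx : x = "|"
      · subst hx
        simp only [ne_eq, not_true_eq_false, if_false, if_neg hi]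
        rw [ih (i + 1) pre (pv ++ [pvP head]) (by simp) (by simp at hlen ⊢; omega)]
        obtain ⟨g, gs, hgs⟩ := List.exists_cons_of_ne_nil (pvGroups_ne_nil (y :: ys))
        rw [pvGroups_bar, hgs]
        simp
      · simp only [ne_eq, hx, not_false_eq_true, if_true, if_neg hi]
        rw [ih (i + 1) (head ++ [x]) pv (by simp) (by simp at hlen ⊢; omega)]
        obtain ⟨g, gs, hgs⟩ := List.exists_cons_of_ne_nil (pvGroups_ne_nil (y :: ys))
        rw [pvGroups_cons x (y :: ys) hx, hgs]
        simp

-- ===== VERDICT (by name: the statement is the Claim_ definition above) =====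
theorem meta_prod_spec : Claim_equal_meta_prod := by
  intro values _
  unfold Spec_meta_prod meta_prod meta_prod_alt
  generalize (PySem.Str.split? values " ").getD [] = toks
  have hA : PySem.List.slice toks none (some 2) = List.take 2 toks := by
    rw [PySem.List.slice_to] <;> simp
  have hB : PySem.List.slice toks (some 2) none = List.drop 2 toks := by
    rw [PySem.List.slice_from] <;> simp
  simp only [hA, hB]
  cases hrest : List.drop 2 toks with
  | nil => simp [PySem.List.enumerate, PySem.Str.join, PySem.Chars.join, List.intercalate]
  | cons r rs =>
    have h := pvLoop (List.take 2 toks) ((r :: rs).length) (r :: rs) 0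
      (List.take 2 toks) [] (by simp) (by simp)
    simp only [pvP] at h
    simp only [List.isEmpty_cons, if_neg (by simp : ¬ (false = true))]
    rw [h]
    obtain ⟨g, gs, hgs⟩ := List.exists_cons_of_ne_nil (pvGroups_ne_nil (r :: rs))
    rw [hgs]
    simp
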